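-- pv_equiv track=rewrite | github.com/followthesapper/phaselab | src/phaselab/predictors/protocol.py | _matches_pam
-- ===== SOURCE A (Python) =====
-- def _matches_pam(pam: str, pattern: str) -> bool:
--     """Check if PAM matches pattern (N = any)."""
--     if len(pam) != len(pattern):
--         return False
--     for p, pat in zip(pam, pattern):
--         if pat == "N":
--             continue
--         if p != pat:
--             return False
--     return True
-- ===== SOURCE B (Python) =====
-- def _matches_pam(pam: str, pattern: str) -> bool:
--     """Check if PAM matches pattern (N = any): split the pattern into its
--     literal segments between 'N' wildcards and compare each segment as one
--     slice of pam, consuming pam segment by segment."""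
--     if len(pam) != len(pattern):
--         return False
--     rest = pam
--     for part in pattern.split("N"):
--         if rest[:len(part)] != part:
--             return False
--         rest = rest[len(part) + 1:]
--     return True
-- ===== Notes on version B (the rewrite author's own statement) =====
-- stated objective: alternative
-- what changed: Replaces the per-character zip scan by splitting the pattern on 'N' into literal segments and matching each segment as one slice comparison against pam, consuming pam segment by segment.
import Mathlib
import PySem

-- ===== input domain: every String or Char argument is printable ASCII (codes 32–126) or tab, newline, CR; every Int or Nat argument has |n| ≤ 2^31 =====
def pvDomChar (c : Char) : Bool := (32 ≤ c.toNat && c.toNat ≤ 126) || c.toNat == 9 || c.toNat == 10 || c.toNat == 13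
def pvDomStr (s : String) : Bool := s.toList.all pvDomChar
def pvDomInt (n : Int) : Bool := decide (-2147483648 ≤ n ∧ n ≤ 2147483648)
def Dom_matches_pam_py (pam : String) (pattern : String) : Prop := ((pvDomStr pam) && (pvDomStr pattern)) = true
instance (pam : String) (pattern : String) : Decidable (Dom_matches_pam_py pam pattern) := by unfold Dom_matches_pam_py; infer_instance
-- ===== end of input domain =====

-- B splits the pattern on 'N' into literal segments and matches each as one slice of pam; A scans per character.

-- ===== PORT A =====
-- the `for p, pat in zip(pam, pattern)` loop with its early `return False`
def pvLoopA : List (Char × Char) → Bool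
  | [] => true
  | (p, pat) :: rest =>
    if pat = 'N' then pvLoopA rest
    else if p ≠ pat then false
    else pvLoopA rest

def matches_pam_py (pam : String) (pattern : String) : Bool :=
  if pam.toList.length ≠ pattern.toList.length then false
  else pvLoopA (pam.toList.zip pattern.toList)

-- ===== PORT B =====
-- Python's str.split("N") on the pattern (always returns a nonempty list; "".split("N") = [""])
def pvSplitN : List Char → List (List Char)
  | [] => [[]]
  | c :: rest =>
    if c = 'N' then [] :: pvSplitN rest
    else match pvSplitN rest with
      | [] => [[c]]
      | h :: t => (c :: h) :: t

-- the `for part in pattern.split("N")` loop; `rest[:len(part)]` / `rest[len(part)+1:]`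
-- are Python slices with nonnegative bounds, exactly List.take / List.drop
def pvLoopB : List Char → List (List Char) → Bool
  | _, [] => true
  | rest, part :: parts =>
    if rest.take part.length ≠ part then false
    else pvLoopB (rest.drop (part.length + 1)) parts

def matches_pam_py_alt (pam : String) (pattern : String) : Bool :=
  if pam.toList.length ≠ pattern.toList.length then false
  else pvLoopB pam.toList (pvSplitN pattern.toList)

-- ===== PRECONDITION & SPEC =====
def Spec_matches_pam_py (pam : String) (pattern : String) (out : Bool) : Prop := out = matches_pam_py_alt pam pattern
instance (pam : String) (pattern : String) (out : Bool) : Decidable (Spec_matches_pam_py pam pattern out) := by unfold Spec_matches_pam_py; infer_instance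

-- ===== CLAIM (what is proved, stated in full; the proofs are below) =====
def Claim_equal_matches_pam_py : Prop := ∀ (pam : String) (pattern : String), Dom_matches_pam_py pam pattern → Spec_matches_pam_py pam pattern (matches_pam_py pam pattern)

-- ===== LEMMAS AND PROOFS =====

theorem pvSplitN_ne_nil (ys : List Char) : pvSplitN ys ≠ [] := by
  cases ys with
  | nil => simp [pvSplitN]
  | cons c rest =>
    simp only [pvSplitN]
    split
    · simp
    · split
      · simp
      · simp

theorem pvLoopB_eq_loopA (ys xs : List Char) (h : xs.length = ys.length) :
    pvLoopB xs (pvSplitN ys) = pvLoopA (xs.zip ys) := by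
  induction ys generalizing xs with
  | nil =>
    cases xs with
    | nil => simp [pvSplitN, pvLoopB, pvLoopA]
    | cons a as => simp at h
  | cons c rest ih =>
    cases xs with
    | nil => simp at h
    | cons a as =>
      simp only [List.length_cons, Nat.add_right_cancel_iff] at h
      by_cases hc : c = 'N'
      · subst hc
        simp only [pvSplitN, if_pos rfl, pvLoopB, List.length_nil, List.take_zero,
          List.drop_succ_cons, List.drop_zero, List.zip_cons_cons, pvLoopA, if_pos rfl]
        simpa using ih as h
      · have hsp := pvSplitN_ne_nil rest
        obtain ⟨hh, tt, hrest⟩ : ∃ hh tt, pvSplitN rest = hh :: tt := by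
          cases hs : pvSplitN rest with
          | nil => exact absurd hs hsp
          | cons x y => exact ⟨x, y, rfl⟩
        have hB : pvLoopB (a :: as) (pvSplitN (c :: rest)) =
            if a = c then pvLoopB as (pvSplitN rest) else false := by
          simp only [pvSplitN, if_neg hc, hrest]
          by_cases hac : a = c
          · subst hac
            simp only [if_pos rfl, pvLoopB, List.length_cons, List.take_succ_cons,
              List.drop_succ_cons, hrest]
            by_cases ht : as.take hh.length = hh
            · simp [ht]
            · simp [ht]
          · simp [pvLoopB, hac]
        rw [hB]
        simp only [List.zip_cons_cons, pvLoopA, if_neg hc]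
        by_cases hac : a = c
        · subst hac; simp [ih as h]
        · simp [hac]

-- ===== VERDICT (by name: the statement is the Claim_ definition above) =====
theorem matches_pam_py_spec : Claim_equal_matches_pam_py := by
  intro pam pattern _
  unfold Spec_matches_pam_py matches_pam_py matches_pam_py_alt
  by_cases h : pam.toList.length = pattern.toList.length
  · simp [h, pvLoopB_eq_loopA _ _ h]
  · have h' : ¬ pam.length = pattern.length := by simpa using h
    simp [h']
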